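-- pv_equiv track=rewrite | github.com/kryntzz/FP | Projeto_1/Projeto_1.py | ordena_posicoes_tabuleiro_aux
-- ===== SOURCE A (Python) =====
-- def linha(tab,pos):
--     """
--     Devolve a linha onde se encontra a pos
--
--     linha:tab,pos-->int
--     """
--     return (pos-1)//(len(tab[0]))
--
-- def coluna(tab,pos):
--     """
--     Devolve o indice da coluna de pos
--
--     coluna:tab,pos-->int
--     """
--     return (pos-1)%(len(tab[0]))
--
-- def distancia(tab,pos1,pos2):
--     """
--     Devolve a distância entre dois
--     pontos no tabuleiro
--
--     distancia:tab,pos1,pos2 -->int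
--     """
--
--     cord1 = (linha(tab,pos1),coluna(tab,pos1))
--     cord2 = (linha(tab,pos2),coluna(tab,pos2))
--     return (max(abs(cord1[0]-cord2[0]),abs(cord1[1]-cord2[1])))
--
-- def ordena_posicoes_tabuleiro_aux(tab,tup):
--     """
--     Recebe um tabuleiro e um tuplo de posições do tabuleiro (potencialmente vazio),
--     e devolve o tuplo com as posições em ordem ascendente de
--     distância à posição central do tabuleiro. Posições com igual distância à posição central,
--     são ordenadas de menor a maior de acordo com a posição que ocupam no tabuleiro.
--
--     ordena_posicoes_tabuleiro:tab,tuple -->tuple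
--     """
--     pos=((len(tab))//2)*len(tab[0])+(len(tab[0])//2)+1
--     res,d=(),0
--     tup = sorted(tup)
--     if len(tup)==1:
--         return (tup[0],)
--     while d<=distancia(tab,pos,1):
--         for pos_t in tup:
--             if distancia(tab,pos_t,pos)==d:
--                 res+=(pos_t,)
--         d+=1
--     return res
-- ===== SOURCE B (Python) =====
-- def ordena_posicoes_tabuleiro_aux(tab, tup):
--     m = len(tab[0])
--     center = (len(tab) // 2) * m + m // 2 + 1
--     cr, cc = (center - 1) // m, (center - 1) % m
--
--     def dist(p):
--         return max(abs((p - 1) // m - cr), abs((p - 1) % m - cc))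
--
--     buckets = {}
--     for p in sorted(tup):
--         buckets.setdefault(dist(p), []).append(p)
--     res = []
--     for d in range(dist(1) + 1):
--         res.extend(buckets.get(d, []))
--     return tuple(res)
-- ===== Notes on version B (the rewrite author's own statement) =====
-- stated objective: faster
-- what changed: B replaces A's rescan of the whole tuple once per distance level (O(D*n) after sorting) with one bucketing pass over the sorted tuple into a distance->positions dict plus one emission pass over the distance levels.
-- intended difference: On singleton tuples whose sole position is farther from the centre than position 1 (possible only for positions outside the board), A's len(tup)==1 shortcut returns that position while B omits it, exactly as A itself omits such too-far positions from tuples of any other length; B's uniform behaviour is the intended one. — e.g. on ordena_posicoes_tabuleiro_aux([[0]], [2]): A returns [2], B returns []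
-- outside the precondition, e.g. on ordena_posicoes_tabuleiro_aux([[]], (5,)): A returns (5,), B raises ZeroDivisionError
import Mathlib
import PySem

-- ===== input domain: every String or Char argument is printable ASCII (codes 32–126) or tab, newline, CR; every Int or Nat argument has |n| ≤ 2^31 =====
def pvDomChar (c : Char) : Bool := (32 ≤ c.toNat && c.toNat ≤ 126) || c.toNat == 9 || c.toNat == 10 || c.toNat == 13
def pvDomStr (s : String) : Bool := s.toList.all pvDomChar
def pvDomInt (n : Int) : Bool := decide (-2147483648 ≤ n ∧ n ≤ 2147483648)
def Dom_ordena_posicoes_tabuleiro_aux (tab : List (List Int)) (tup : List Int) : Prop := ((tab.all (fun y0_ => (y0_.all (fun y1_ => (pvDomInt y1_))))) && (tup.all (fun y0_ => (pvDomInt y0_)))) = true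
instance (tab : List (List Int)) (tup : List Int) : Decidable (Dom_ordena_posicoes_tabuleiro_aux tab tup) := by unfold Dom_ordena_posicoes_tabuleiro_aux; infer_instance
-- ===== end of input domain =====

-- B builds a distance→positions dict in one pass over the sorted tuple and emits the buckets in
-- one pass over the distance levels, instead of A's rescan of the whole tuple per distance level
-- (objective: faster — one pass instead of a pass per level; return-value equivalence only, neither version mutates its arguments).

-- ===== PORT A =====
def pvLinha (tab : List (List Int)) (pos : Int) : Int :=
  PySem.Int.floordiv (pos - 1) (PySem.List.len (tab.headD []))

def pvColuna (tab : List (List Int)) (pos : Int) : Int :=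
  PySem.Int.mod (pos - 1) (PySem.List.len (tab.headD []))

def pvDistancia (tab : List (List Int)) (pos1 pos2 : Int) : Int :=
  max |pvLinha tab pos1 - pvLinha tab pos2| |pvColuna tab pos1 - pvColuna tab pos2|

def ordena_posicoes_tabuleiro_aux (tab : List (List Int)) (tup : List Int) : List Int :=
  let pos : Int := PySem.Int.floordiv (PySem.List.len tab) 2 * PySem.List.len (tab.headD [])
      + PySem.Int.floordiv (PySem.List.len (tab.headD [])) 2 + 1
  let tupS := PySem.List.sorted tup (fun x => x) false
  if PySem.List.len tupS == 1 then [PySem.List.pyGetD tupS 0 0]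
  else
    -- while d <= distancia(tab,pos,1): for pos_t in tup: if ... res += (pos_t,) ; d += 1
    (PySem.List.pyRange 0 (pvDistancia tab pos 1 + 1) 1).foldl
      (fun res d => tupS.foldl
        (fun r pos_t => if pvDistancia tab pos_t pos == d then r ++ [pos_t] else r) res) []

-- ===== PORT B =====
def ordena_posicoes_tabuleiro_aux_alt (tab : List (List Int)) (tup : List Int) : List Int :=
  let m : Int := PySem.List.len (tab.headD [])
  let center : Int := PySem.Int.floordiv (PySem.List.len tab) 2 * m + PySem.Int.floordiv m 2 + 1
  let cr : Int := PySem.Int.floordiv (center - 1) m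
  let cc : Int := PySem.Int.mod (center - 1) m
  let dist : Int → Int := fun p =>
    max |PySem.Int.floordiv (p - 1) m - cr| |PySem.Int.mod (p - 1) m - cc|
  let buckets : PySem.Dict Int (List Int) :=
    (PySem.List.sorted tup (fun x => x) false).foldl
      (fun b p => b.modify (dist p) [] (fun l => l ++ [p])) PySem.Dict.empty
  (PySem.List.pyRange 0 (dist 1 + 1) 1).foldl (fun res d => res ++ buckets.getD d []) []

-- ===== PRECONDITION & SPEC =====
-- Pre_ excludes boards with no rows (len(tab[0]) raises IndexError in A) or an empty first row
-- (ZeroDivisionError in A's distance computation, except behind A's accidental len(tup)==1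
-- shortcut, where B's division still raises); everything else is admitted.
def Pre_ordena_posicoes_tabuleiro_aux (tab : List (List Int)) (tup : List Int) : Prop :=
  tab ≠ [] ∧ tab.headD [] ≠ []
instance (tab : List (List Int)) (tup : List Int) : Decidable (Pre_ordena_posicoes_tabuleiro_aux tab tup) := by unfold Pre_ordena_posicoes_tabuleiro_aux; infer_instance

def pvWitness_ordena_posicoes_tabuleiro_aux : List (List Int) × List Int := ([[0, 0], [0, 0]], [1, 2])

-- On singleton tuples whose sole position is farther from the centre than position 1 (possible only
-- for positions outside the board), A's len(tup)==1 shortcut returns that position while B omits it,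
-- exactly as A itself omits such too-far positions from every tuple of any other length; B's uniform
-- behaviour is the intended one.
def D_ordena_posicoes_tabuleiro_aux (tab : List (List Int)) (tup : List Int) : Prop :=
  tup.length = 1 ∧
  (let m : Int := (tab.headD []).length
   let p : Int := tup.headD 0
   max ((tab.length : Int) / 2) (m / 2)
     < max |(p - 1).fdiv m - (tab.length : Int) / 2| |(p - 1).fmod m - m / 2|)
instance (tab : List (List Int)) (tup : List Int) : Decidable (D_ordena_posicoes_tabuleiro_aux tab tup) := by unfold D_ordena_posicoes_tabuleiro_aux; infer_instance

def Spec_ordena_posicoes_tabuleiro_aux (tab : List (List Int)) (tup : List Int) (out : List Int) : Prop := ¬ D_ordena_posicoes_tabuleiro_aux tab tup → out = ordena_posicoes_tabuleiro_aux_alt tab tup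
instance (tab : List (List Int)) (tup : List Int) (out : List Int) : Decidable (Spec_ordena_posicoes_tabuleiro_aux tab tup out) := by unfold Spec_ordena_posicoes_tabuleiro_aux; infer_instance

def pvDiffWitness_ordena_posicoes_tabuleiro_aux : List (List Int) × List Int := ([[0]], [2])
def pvDiffWitnessOut_ordena_posicoes_tabuleiro_aux : (List Int) × (List Int) := ([2], [])

-- ===== CLAIM (what is proved, stated in full; the proofs are below) =====
def Claim_unchanged_ordena_posicoes_tabuleiro_aux : Prop := ∀ (tab : List (List Int)) (tup : List Int), Dom_ordena_posicoes_tabuleiro_aux tab tup → Pre_ordena_posicoes_tabuleiro_aux tab tup → Spec_ordena_posicoes_tabuleiro_aux tab tup (ordena_posicoes_tabuleiro_aux tab tup)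
def Claim_changed_ordena_posicoes_tabuleiro_aux : Prop := Dom_ordena_posicoes_tabuleiro_aux (pvDiffWitness_ordena_posicoes_tabuleiro_aux.1) (pvDiffWitness_ordena_posicoes_tabuleiro_aux.2) ∧ Pre_ordena_posicoes_tabuleiro_aux (pvDiffWitness_ordena_posicoes_tabuleiro_aux.1) (pvDiffWitness_ordena_posicoes_tabuleiro_aux.2) ∧ D_ordena_posicoes_tabuleiro_aux (pvDiffWitness_ordena_posicoes_tabuleiro_aux.1) (pvDiffWitness_ordena_posicoes_tabuleiro_aux.2) ∧ ordena_posicoes_tabuleiro_aux (pvDiffWitness_ordena_posicoes_tabuleiro_aux.1) (pvDiffWitness_ordena_posicoes_tabuleiro_aux.2) = pvDiffWitnessOut_ordena_posicoes_tabuleiro_aux.1 ∧ ordena_posicoes_tabuleiro_aux_alt (pvDiffWitness_ordena_posicoes_tabuleiro_aux.1) (pvDiffWitness_ordena_posicoes_tabuleiro_aux.2) = pvDiffWitnessOut_ordena_posicoes_tabuleiro_aux.2 ∧ pvDiffWitnessOut_ordena_posicoes_tabuleiro_aux.1 ≠ pvDiffWitnessOut_ordena_posicoes_tabuleiro_aux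.2
def Claim_exact_ordena_posicoes_tabuleiro_aux : Prop := ∀ (tab : List (List Int)) (tup : List Int), Dom_ordena_posicoes_tabuleiro_aux tab tup → Pre_ordena_posicoes_tabuleiro_aux tab tup → D_ordena_posicoes_tabuleiro_aux tab tup → ordena_posicoes_tabuleiro_aux tab tup ≠ ordena_posicoes_tabuleiro_aux_alt tab tup

-- ===== LEMMAS AND PROOFS =====

-- the centre position both ports compute
def pvCenter (tab : List (List Int)) : Int :=
  PySem.Int.floordiv (PySem.List.len tab) 2 * PySem.List.len (tab.headD [])
    + PySem.Int.floordiv (PySem.List.len (tab.headD [])) 2 + 1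

-- under Pre_, D_'s plain-arithmetic condition is exactly "the sole position is farther from the
-- centre than position 1" in the ports' distance
theorem pv_D_iff (tab : List (List Int)) (tup : List Int) (hm : tab.headD [] ≠ []) :
    D_ordena_posicoes_tabuleiro_aux tab tup ↔
      (tup.length = 1 ∧
        pvDistancia tab 1 (pvCenter tab) < pvDistancia tab (tup.headD 0) (pvCenter tab)) := by
  have hm0 : (0:Int) < ((tab.headD []).length : Int) := by
    exact_mod_cast Nat.pos_of_ne_zero (fun h => hm (List.eq_nil_of_length_eq_zero h))
  set mN := (tab.headD []).length with hmN
  set r0 : Int := ((tab.length / 2 : Nat) : Int) with hr0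
  set c0 : Int := ((mN / 2 : Nat) : Int) with hc0
  have hc0n : 0 ≤ c0 := by rw [hc0]; exact Int.natCast_nonneg _
  have hr0n : 0 ≤ r0 := by rw [hr0]; exact Int.natCast_nonneg _
  have hc0lt : c0 < (mN : Int) := by
    rw [hc0]
    exact_mod_cast Nat.div_lt_self (by exact_mod_cast hm0) (by omega)
  have hcm : pvCenter tab - 1 = r0 * (mN : Int) + c0 := by
    unfold pvCenter
    have h1 : PySem.Int.floordiv (PySem.List.len tab) 2 = r0 := by
      rw [hr0, PySem.List.len_eq]; exact_mod_cast PySem.Int.floordiv_natCast tab.length 2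
    have h2 : PySem.Int.floordiv (PySem.List.len (tab.headD [])) 2 = c0 := by
      rw [hc0, PySem.List.len_eq]; exact_mod_cast PySem.Int.floordiv_natCast mN 2
    rw [h1, h2]
    have h3 : PySem.List.len (tab.headD []) = (mN : Int) := by rw [PySem.List.len_eq]
    rw [h3]; ring
  have hlinC : pvLinha tab (pvCenter tab) = r0 := by
    unfold pvLinha
    show PySem.Int.floordiv (pvCenter tab - 1) (PySem.List.len (tab.headD [])) = r0
    rw [hcm]
    show (r0 * (mN : Int) + c0).fdiv ((mN : Int)) = r0
    rw [Int.fdiv_eq_ediv_of_nonneg _ (le_of_lt hm0), add_comm,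
      Int.add_mul_ediv_right _ _ (ne_of_gt hm0), Int.ediv_eq_zero_of_lt hc0n hc0lt]
    ring
  have hcolC : pvColuna tab (pvCenter tab) = c0 := by
    unfold pvColuna
    rw [hcm]
    show (r0 * (mN : Int) + c0).fmod ((mN : Int)) = c0
    rw [Int.fmod_eq_emod_of_nonneg _ (le_of_lt hm0), add_comm, Int.add_mul_emod_self_right,
      Int.emod_eq_of_lt hc0n hc0lt]
  have hlin1 : pvLinha tab 1 = 0 := by
    show ((1:Int) - 1).fdiv ((mN : Int)) = 0
    norm_num
  have hcol1 : pvColuna tab 1 = 0 := by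
    show ((1:Int) - 1).fmod ((mN : Int)) = 0
    norm_num
  have e1 : pvDistancia tab 1 (pvCenter tab) = max r0 c0 := by
    unfold pvDistancia
    rw [hlinC, hcolC, hlin1, hcol1, zero_sub, zero_sub, abs_neg, abs_neg,
      abs_of_nonneg hr0n, abs_of_nonneg hc0n]
  have e2 : pvDistancia tab (tup.headD 0) (pvCenter tab)
      = max |(tup.headD 0 - 1).fdiv (mN : Int) - r0| |(tup.headD 0 - 1).fmod (mN : Int) - c0| := by
    unfold pvDistancia
    rw [hlinC, hcolC]
    rfl
  have hr0' : ((tab.length : Int)) / 2 = r0 := by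
    rw [hr0]; exact_mod_cast (Int.natCast_ediv tab.length 2).symm
  have hc0' : ((mN : Int)) / 2 = c0 := by
    rw [hc0]; exact_mod_cast (Int.natCast_ediv mN 2).symm
  unfold D_ordena_posicoes_tabuleiro_aux
  simp only [← hmN]
  rw [hr0', hc0', e1, e2]

-- B's bucket dict looked up at level d is the filter of the sorted tuple at that level
theorem pv_bucket_getD (S : List Int) (key : Int → Int) (d : Int) :
    ((S.foldl (fun b p => b.modify (key p) [] (fun l => l ++ [p]))
        (PySem.Dict.empty : PySem.Dict Int (List Int))).getD d [])
      = S.filter (fun q => key q == d) := by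
  have h := PySem.Dict.getD_foldl_modify_append
      (l := S.map (fun p => (key p, p))) (d := (PySem.Dict.empty : PySem.Dict Int (List Int))) (c := d)
  rw [List.foldl_map] at h
  rw [h]
  simp [List.filter_map, Function.comp_def]

theorem pv_emit_nil (L : List Int) (k : Int) (p : Int) (acc : List Int) (h : k ∉ L) :
    L.foldl (fun res d => res ++ if (k == d : Bool) then [p] else []) acc = acc := by
  induction L generalizing acc with
  | nil => rfl
  | cons d L ih =>
    have hne : ¬ ((k == d) = true) := by
      simp only [beq_iff_eq]
      intro he; exact h (he ▸ List.mem_cons_self)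
    rw [List.foldl_cons, if_neg hne, List.append_nil]
    exact ih acc (fun hm => h (List.mem_cons_of_mem _ hm))

theorem pv_emit_mem (L : List Int) (k : Int) (p : Int) (acc : List Int)
    (hnd : L.Nodup) (h : k ∈ L) :
    L.foldl (fun res d => res ++ if (k == d : Bool) then [p] else []) acc = acc ++ [p] := by
  induction L generalizing acc with
  | nil => cases h
  | cons d L ih =>
    rcases List.nodup_cons.mp hnd with ⟨hdn, hnd'⟩
    by_cases he : k = d
    · subst he
      rw [List.foldl_cons, if_pos (beq_self_eq_true k)]
      exact pv_emit_nil L k p (acc ++ [p]) hdn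
    · have hm : k ∈ L := by
        rcases List.mem_cons.mp h with h1 | h1
        · exact absurd h1 he
        · exact h1
      rw [List.foldl_cons, if_neg (by simpa using he), List.append_nil]
      exact ih acc hnd' hm

-- both ports, outside A's len==1 branch, equal the same range-fold of filters of the sorted tuple
theorem pv_alt_eq_fold (tab : List (List Int)) (tup : List Int) :
    ordena_posicoes_tabuleiro_aux_alt tab tup
      = (PySem.List.pyRange 0 (pvDistancia tab 1 (pvCenter tab) + 1) 1).foldl
          (fun res d => res ++ (PySem.List.sorted tup (fun x => x) false).filter
            (fun q => pvDistancia tab q (pvCenter tab) == d)) [] := by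
  unfold ordena_posicoes_tabuleiro_aux_alt
  simp only [pv_bucket_getD]
  have hk : ∀ p : Int,
      (max |PySem.Int.floordiv (p - 1) (PySem.List.len (tab.headD []))
            - PySem.Int.floordiv (pvCenter tab - 1) (PySem.List.len (tab.headD []))|
          |PySem.Int.mod (p - 1) (PySem.List.len (tab.headD []))
            - PySem.Int.mod (pvCenter tab - 1) (PySem.List.len (tab.headD []))|)
        = pvDistancia tab p (pvCenter tab) := fun p => rfl
  simp only [pvCenter] at hk
  simp only [hk]
  rfl

theorem pv_A_else_eq_fold (tab : List (List Int)) (tup : List Int)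
    (h : ¬ PySem.List.len (PySem.List.sorted tup (fun x => x) false) == 1) :
    ordena_posicoes_tabuleiro_aux tab tup
      = (PySem.List.pyRange 0 (pvDistancia tab 1 (pvCenter tab) + 1) 1).foldl
          (fun res d => res ++ (PySem.List.sorted tup (fun x => x) false).filter
            (fun q => pvDistancia tab q (pvCenter tab) == d)) [] := by
  have hd : ∀ p q : Int, pvDistancia tab p q = pvDistancia tab q p := by
    intro p q
    unfold pvDistancia
    rw [abs_sub_comm, abs_sub_comm (pvColuna tab p)]
  simp only [ordena_posicoes_tabuleiro_aux]
  rw [if_neg (by simpa using h)]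
  simp only [PySem.List.foldl_append_if_eq_filter]
  have hc : (PySem.Int.floordiv (PySem.List.len tab) 2 * PySem.List.len (tab.headD [])
      + PySem.Int.floordiv (PySem.List.len (tab.headD [])) 2 + 1) = pvCenter tab := rfl
  simp only [hc, hd (p := 1)]

theorem pv_dist_nonneg (tab : List (List Int)) (p q : Int) : 0 ≤ pvDistancia tab p q :=
  le_trans (abs_nonneg _) (le_max_left _ _)

theorem pv_sorted_singleton (p : Int) :
    PySem.List.sorted [p] (fun x : Int => x) false = [p] := rfl

theorem pv_A_singleton (tab : List (List Int)) (p : Int) :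
    ordena_posicoes_tabuleiro_aux tab [p] = [p] := by
  simp [ordena_posicoes_tabuleiro_aux, pv_sorted_singleton, PySem.List.len_eq,
    PySem.List.pyGetD_zero_cons]

theorem pv_len_one (tup : List Int) (h : tup.length = 1) : tup = [tup.headD 0] := by
  cases tup with
  | nil => simp at h
  | cons a t => cases t with
    | nil => rfl
    | cons b t => simp at h

-- ===== VERDICT (by name: the statement is the Claim_ definition above) =====
theorem ordena_posicoes_tabuleiro_aux_spec : Claim_unchanged_ordena_posicoes_tabuleiro_aux := by
  intro tab tup _ hpre hnd
  by_cases h1 : tup.length = 1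
  · -- singleton: A returns the sorted head; B emits it, its distance being within range
    have htup := pv_len_one tup h1
    set p := tup.headD 0 with hp
    have hle : pvDistancia tab p (pvCenter tab) ≤ pvDistancia tab 1 (pvCenter tab) := by
      rw [pv_D_iff tab tup hpre.2] at hnd
      push Not at hnd
      exact hnd h1
    have hmem : pvDistancia tab p (pvCenter tab) ∈
        PySem.List.pyRange 0 (pvDistancia tab 1 (pvCenter tab) + 1) 1 := by
      rw [PySem.List.mem_pyRange_one]
      exact ⟨pv_dist_nonneg tab p (pvCenter tab), by omega⟩
    rw [htup, pv_A_singleton, pv_alt_eq_fold, pv_sorted_singleton]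
    simp only [List.filter_cons, List.filter_nil]
    rw [pv_emit_mem _ _ _ _ (PySem.List.nodup_pyRange_one 0 _) hmem]
    simp
  · -- not a singleton: both sides are the same range-fold of filters
    have hlen : ¬ PySem.List.len (PySem.List.sorted tup (fun x : Int => x) false) == 1 := by
      simp [PySem.List.len_eq, PySem.List.length_sorted, h1]
    rw [pv_A_else_eq_fold tab tup hlen, pv_alt_eq_fold]

theorem ordena_posicoes_tabuleiro_aux_changed : Claim_changed_ordena_posicoes_tabuleiro_aux := by
  unfold Claim_changed_ordena_posicoes_tabuleiro_aux; decide

theorem ordena_posicoes_tabuleiro_aux_tight : Claim_exact_ordena_posicoes_tabuleiro_aux := by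
  intro tab tup _ hpre hd
  obtain ⟨h1, hgt⟩ := (pv_D_iff tab tup hpre.2).mp hd
  have htup := pv_len_one tup h1
  set p := tup.headD 0 with hp
  have hnm : pvDistancia tab p (pvCenter tab) ∉
      PySem.List.pyRange 0 (pvDistancia tab 1 (pvCenter tab) + 1) 1 := by
    rw [PySem.List.mem_pyRange_one]
    push Not
    intro _
    omega
  rw [htup, pv_A_singleton, pv_alt_eq_fold, pv_sorted_singleton]
  simp only [List.filter_cons, List.filter_nil]
  rw [pv_emit_nil _ _ _ _ hnm]
  simp
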